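-- pv_equiv track=rewrite | github.com/CristianJGarcia/create-strings-from-characters | main.py | create_strings_from_characters
-- ===== SOURCE A (Python) =====
-- def create_strings_from_characters(frequencies, string1, string2):
--     # Write your code here.
--     if len(frequencies) == 0:
--         if string1 == "" and string2 == "":
--             return 2
--         else:
--             return 0
--
--     freq_copy = frequencies.copy()
--
--     string1_creation = True
--     string2_creation = True
--
--     # checks to see if i can get both words without reusing any characters
--     for character, chr_count in freq_copy.items():
--         if string1_creation:
--             for letter in string1:
--                 if letter == character:
--                     if chr_count > 0:
--                         chr_count -= 1
--                     else:
--                         string1_creation = False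
--                         break
--         if string2_creation:
--             for letter in string2:
--                 if letter == character:
--                     if chr_count > 0:
--                         chr_count -= 1
--                     else:
--                         string2_creation = False
--                         break
--
--     if string1_creation and string2_creation:
--         return 2
--     else:
--         string1_creation = True
--         string2_creation = True
--     ###############################################################
--     freq_copy = frequencies.copy()
--
--     for character, chr_count in freq_copy.items():
--         if string1_creation:
--             for letter in string1:
--                 if letter == character:
--                     if chr_count > 0:
--                         chr_count -= 1
--                     else:
--                         string1_creation = False
--                         break
--
--     for character, chr_count in freq_copy.items():
--         if string2_creation:
--             for letter in string2:
--                 if letter == character: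
--                     if chr_count > 0:
--                         chr_count -= 1
--                     else:
--                         string2_creation = False
--                         break
--
--     if string1_creation or string2_creation:
--         return 1
--
--     return 0
-- ===== SOURCE B (Python) =====
-- def create_strings_from_characters(frequencies, string1, string2):
--     if len(frequencies) == 0:
--         return 2 if string1 == "" and string2 == "" else 0
--     c1 = {}
--     for ch in string1:
--         c1[ch] = c1.get(ch, 0) + 1
--     c2 = {}
--     for ch in string2:
--         c2[ch] = c2.get(ch, 0) + 1
--     can_both = can1 = can2 = True
--     for ch, budget in frequencies.items():
--         avail = budget if budget > 0 else 0
--         n1 = c1.get(ch, 0)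
--         n2 = c2.get(ch, 0)
--         if n1 + n2 > avail:
--             can_both = False
--         if n1 > avail:
--             can1 = False
--         if n2 > avail:
--             can2 = False
--     if can_both:
--         return 2
--     if can1 or can2:
--         return 1
--     return 0
-- ===== Notes on version B (the rewrite author's own statement) =====
-- stated objective: faster
-- what changed: Replaces A's three budget-decrementing scans of the dict (each with a nested per-letter loop over the strings, breaks and a shared leftover budget) by counting each string's characters once into a dict and then making a single pass over frequencies.items() that maintains three boolean flags (both/only1/only2) via count comparisons.
import Mathlib
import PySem

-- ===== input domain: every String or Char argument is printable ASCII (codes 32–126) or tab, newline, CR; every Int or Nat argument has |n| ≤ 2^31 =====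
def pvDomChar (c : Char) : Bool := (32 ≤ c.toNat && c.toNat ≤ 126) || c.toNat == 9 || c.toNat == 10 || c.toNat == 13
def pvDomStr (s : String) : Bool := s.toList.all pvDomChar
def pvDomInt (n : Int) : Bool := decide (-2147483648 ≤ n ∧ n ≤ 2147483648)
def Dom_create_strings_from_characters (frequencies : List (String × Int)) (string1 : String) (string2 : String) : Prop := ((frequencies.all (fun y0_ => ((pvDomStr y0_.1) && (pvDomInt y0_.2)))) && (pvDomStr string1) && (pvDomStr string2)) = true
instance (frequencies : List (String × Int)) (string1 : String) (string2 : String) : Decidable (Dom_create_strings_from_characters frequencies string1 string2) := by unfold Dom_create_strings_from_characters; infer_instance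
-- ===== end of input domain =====

-- B counts each string's characters once and checks all three feasibility flags in one
-- pass over the frequency dict, instead of A's three budget-decrementing nested scans.

-- ===== PORT A =====
-- inner 'for letter in sN' loop of A: walk the string, decrement the budget on a match
-- while it is positive, otherwise clear the flag and break; returns (leftover budget, flag)
def pvLoop (ch : String) : List Char → Int → Int × Bool
  | [], cnt => (cnt, true)
  | c :: rest, cnt =>
    if String.mk [c] == ch then
      if cnt > 0 then pvLoop ch rest (cnt - 1)
      else (cnt, false)
    else pvLoop ch rest cnt

-- first dict loop of A: shared budget, string1 consumes first, string2 gets the leftover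
def pvPass1Aux (s1 s2 : List Char) (items : List (String × Int)) (st : Bool × Bool) : Bool × Bool :=
  items.foldl (fun st p =>
    let r1 := if st.1 then pvLoop p.1 s1 p.2 else (p.2, st.1)
    let r2 := if st.2 then pvLoop p.1 s2 r1.1 else (r1.1, st.2)
    (r1.2, r2.2)) st

-- each of A's two later dict loops: fresh budget per item, one flag
def pvPass2Aux (s : List Char) (items : List (String × Int)) (f : Bool) : Bool :=
  items.foldl (fun f p => if f then (pvLoop p.1 s p.2).2 else f) f

def create_strings_from_characters (frequencies : List (String × Int)) (string1 : String) (string2 : String) : Int :=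
  if frequencies.length = 0 then
    (if string1 == "" && string2 == "" then 2 else 0)
  else
    let items := (PySem.Dict.ofList frequencies).items
    let r := pvPass1Aux string1.toList string2.toList items (true, true)
    if r.1 && r.2 then 2
    else if pvPass2Aux string1.toList items true || pvPass2Aux string2.toList items true then 1
    else 0

-- ===== PORT B =====
-- 'for ch in s: c[ch] = c.get(ch, 0) + 1' (Python iterates a str as 1-char strings)
def pvCounter (s : List String) : PySem.Dict String Int :=
  s.foldl (fun d ch => d.insert ch (d.getD ch 0 + 1)) PySem.Dict.empty

-- the single 'for ch, budget in frequencies.items()' loop of B, three flags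
def pvAltAux (c1 c2 : PySem.Dict String Int) (items : List (String × Int))
    (st : Bool × Bool × Bool) : Bool × Bool × Bool :=
  items.foldl (fun st p =>
    let avail := if p.2 > 0 then p.2 else 0
    let n1 := c1.getD p.1 0
    let n2 := c2.getD p.1 0
    (if n1 + n2 > avail then false else st.1,
     if n1 > avail then false else st.2.1,
     if n2 > avail then false else st.2.2)) st

def create_strings_from_characters_alt (frequencies : List (String × Int)) (string1 : String) (string2 : String) : Int :=
  if frequencies.length = 0 then
    (if string1 == "" && string2 == "" then 2 else 0)
  else
    let c1 := pvCounter (string1.toList.map (fun c => String.mk [c]))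
    let c2 := pvCounter (string2.toList.map (fun c => String.mk [c]))
    let r := pvAltAux c1 c2 (PySem.Dict.ofList frequencies).items (true, true, true)
    if r.1 then 2
    else if r.2.1 || r.2.2 then 1
    else 0

-- ===== PRECONDITION & SPEC =====
def Spec_create_strings_from_characters (frequencies : List (String × Int)) (string1 : String) (string2 : String) (out : Int) : Prop := out = create_strings_from_characters_alt frequencies string1 string2
instance (frequencies : List (String × Int)) (string1 : String) (string2 : String) (out : Int) : Decidable (Spec_create_strings_from_characters frequencies string1 string2 out) := by unfold Spec_create_strings_from_characters; infer_instance

-- ===== CLAIM (what is proved, stated in full; the proofs are below) =====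
def Claim_equal_create_strings_from_characters : Prop := ∀ (frequencies : List (String × Int)) (string1 : String) (string2 : String), Dom_create_strings_from_characters frequencies string1 string2 → Spec_create_strings_from_characters frequencies string1 string2 (create_strings_from_characters frequencies string1 string2)

-- ===== LEMMAS AND PROOFS =====

-- number of letters of s equal (as 1-char strings) to the key ch
def pvCnt (s : List Char) (ch : String) : Int :=
  ((s.map (fun c => String.mk [c])).count ch : Int)

theorem pvCnt_nonneg (s : List Char) (ch : String) : 0 ≤ pvCnt s ch := by
  simp [pvCnt]

theorem pvLoop_eq (ch : String) (s : List Char) (cnt : Int) :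
    pvLoop ch s cnt = (cnt - min (pvCnt s ch) (max cnt 0), decide (pvCnt s ch ≤ max cnt 0)) := by
  induction s generalizing cnt with
  | nil => simp [pvLoop, pvCnt]
  | cons c rest ih =>
    by_cases h : String.mk [c] == ch
    · have hc : pvCnt (c :: rest) ch = pvCnt rest ch + 1 := by
        simp [pvCnt, List.count_cons, h]
      have h1 := pvCnt_nonneg rest ch
      by_cases hpos : cnt > 0
      · rw [show pvLoop ch (c :: rest) cnt = pvLoop ch rest (cnt - 1) by
              simp [pvLoop, h, hpos], ih]
        refine Prod.ext ?_ ?_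
        · simp only [hc]; omega
        · simp only [hc, decide_eq_decide]; omega
      · rw [show pvLoop ch (c :: rest) cnt = (cnt, false) by simp [pvLoop, h, hpos]]
        refine Prod.ext ?_ ?_
        · simp only [hc]; omega
        · simp only [hc, Bool.false_eq, decide_eq_false_iff_not]; omega
    · have hc : pvCnt (c :: rest) ch = pvCnt rest ch := by
        simp [pvCnt, List.count_cons, h]
      rw [show pvLoop ch (c :: rest) cnt = pvLoop ch rest cnt by simp [pvLoop, h], ih, hc]

theorem pvPass2Aux_cons (s : List Char) (p : String × Int) (rest : List (String × Int)) (f : Bool) :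
    pvPass2Aux s (p :: rest) f = pvPass2Aux s rest (if f then (pvLoop p.1 s p.2).2 else f) := rfl

theorem pvPass2Aux_eq (s : List Char) (items : List (String × Int)) (f : Bool) :
    pvPass2Aux s items f = (f && items.all (fun p => decide (pvCnt s p.1 ≤ max p.2 0))) := by
  induction items generalizing f with
  | nil => simp [pvPass2Aux]
  | cons p rest ih =>
    rw [pvPass2Aux_cons, ih]
    cases f with
    | false => simp
    | true => simp [pvLoop_eq, List.all_cons]

theorem pvPass1Aux_cons (s1 s2 : List Char) (p : String × Int) (rest : List (String × Int))
    (st : Bool × Bool) :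
    pvPass1Aux s1 s2 (p :: rest) st =
      pvPass1Aux s1 s2 rest
        ((if st.1 then pvLoop p.1 s1 p.2 else (p.2, st.1)).2,
         (if st.2 then pvLoop p.1 s2 (if st.1 then pvLoop p.1 s1 p.2 else (p.2, st.1)).1
          else ((if st.1 then pvLoop p.1 s1 p.2 else (p.2, st.1)).1, st.2)).2) := rfl

theorem pvPass1Aux_eq (s1 s2 : List Char) (items : List (String × Int)) (st : Bool × Bool) :
    ((pvPass1Aux s1 s2 items st).1 && (pvPass1Aux s1 s2 items st).2)
      = (st.1 && st.2 && items.all (fun p => decide (pvCnt s1 p.1 + pvCnt s2 p.1 ≤ max p.2 0))) := by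
  induction items generalizing st with
  | nil => simp [pvPass1Aux]
  | cons p rest ih =>
    rw [pvPass1Aux_cons, ih]
    obtain ⟨f1, f2⟩ := st
    cases f1 with
    | false => simp
    | true =>
      cases f2 with
      | false => simp
      | true =>
        have h1 := pvCnt_nonneg s1 p.1
        have h2 := pvCnt_nonneg s2 p.1
        have key : (decide (pvCnt s1 p.1 ≤ max p.2 0) &&
                decide (pvCnt s2 p.1 ≤ max (p.2 - min (pvCnt s1 p.1) (max p.2 0)) 0))
              = decide (pvCnt s1 p.1 + pvCnt s2 p.1 ≤ max p.2 0) := by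
          rw [← Bool.decide_and, decide_eq_decide]; omega
        simp only [pvLoop_eq, if_true, List.all_cons]
        rw [← Bool.and_assoc, ← key, Bool.and_assoc]
        simp only [Bool.and_assoc, Bool.true_and]

theorem pvCounter_getD (s : List Char) (ch : String) :
    (pvCounter (s.map (fun c => String.mk [c]))).getD ch 0 = pvCnt s ch := by
  simp [pvCounter, pvCnt, PySem.Dict.getD_foldl_insert_add_one, PySem.Dict.getD_empty]

theorem pvAltAux_cons (c1 c2 : PySem.Dict String Int) (p : String × Int)
    (rest : List (String × Int)) (st : Bool × Bool × Bool) :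
    pvAltAux c1 c2 (p :: rest) st =
      pvAltAux c1 c2 rest
        (if c1.getD p.1 0 + c2.getD p.1 0 > (if p.2 > 0 then p.2 else 0) then false else st.1,
         if c1.getD p.1 0 > (if p.2 > 0 then p.2 else 0) then false else st.2.1,
         if c2.getD p.1 0 > (if p.2 > 0 then p.2 else 0) then false else st.2.2) := rfl

theorem pvAltAux_eq (c1 c2 : PySem.Dict String Int) (items : List (String × Int))
    (st : Bool × Bool × Bool) :
    pvAltAux c1 c2 items st
      = (st.1 && items.all (fun p => decide (c1.getD p.1 0 + c2.getD p.1 0 ≤ max p.2 0)),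
         st.2.1 && items.all (fun p => decide (c1.getD p.1 0 ≤ max p.2 0)),
         st.2.2 && items.all (fun p => decide (c2.getD p.1 0 ≤ max p.2 0))) := by
  induction items generalizing st with
  | nil => simp [pvAltAux]
  | cons p rest ih =>
    rw [pvAltAux_cons, ih]
    have hav : (if p.2 > 0 then p.2 else 0) = max p.2 0 := by split <;> omega
    simp only [hav, List.all_cons]
    refine Prod.ext ?_ (Prod.ext ?_ ?_) <;> simp only [] <;> split <;> rename_i h <;>
      · first
        | (rw [show (decide (c1.getD p.1 0 + c2.getD p.1 0 ≤ max p.2 0)) = false by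
              simp only [decide_eq_false_iff_not]; omega]; simp)
        | (rw [show (decide (c1.getD p.1 0 + c2.getD p.1 0 ≤ max p.2 0)) = true by
              simp only [decide_eq_true_eq]; omega]; simp)
        | (rw [show (decide (c1.getD p.1 0 ≤ max p.2 0)) = false by
              simp only [decide_eq_false_iff_not]; omega]; simp)
        | (rw [show (decide (c1.getD p.1 0 ≤ max p.2 0)) = true by
              simp only [decide_eq_true_eq]; omega]; simp)
        | (rw [show (decide (c2.getD p.1 0 ≤ max p.2 0)) = false by
              simp only [decide_eq_false_iff_not]; omega]; simp)
        | (rw [show (decide (c2.getD p.1 0 ≤ max p.2 0)) = true by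
              simp only [decide_eq_true_eq]; omega]; simp)

-- ===== VERDICT (by name: the statement is the Claim_ definition above) =====
theorem create_strings_from_characters_spec : Claim_equal_create_strings_from_characters := by
  intro frequencies string1 string2 _
  show _ = _
  unfold create_strings_from_characters create_strings_from_characters_alt
  by_cases hlen : frequencies.length = 0
  · simp [hlen]
  · simp only [if_neg hlen]
    rw [pvAltAux_eq]
    simp only [pvCounter_getD, pvPass2Aux_eq, Bool.true_and]
    rw [pvPass1Aux_eq]
    simp only [Bool.true_and]
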